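-- pv_equiv track=rewrite | github.com/zephyrus9/NewCoder | Huawei/e23 删除字符串中出现次数最少的字符.py | del_min
-- ===== SOURCE A (Python) =====
-- def del_min(l):
--     tmp = []
--     for i in l:
--         tmp.append(l.count(i))
--     min_count = min(tmp)
--     res = []
--     for i in range(len(l)):
--         if tmp[i] != min_count:
--             res.append(l[i])
--         else:
--             pass
--     return ''.join(res)
-- ===== SOURCE B (Python) =====
-- def del_min(l):
--     # Sort the characters, decompose the sorted list into maximal runs of equal
--     # characters (run length = frequency), take the shortest run length, and
--     # drop the characters whose run is that short.
--     s = sorted(l)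
--
--     def runs(s):
--         if not s:
--             return []
--         c = s[0]
--         k = 1
--         while k < len(s) and s[k] == c:
--             k += 1
--         return [(c, k)] + runs(s[k:])
--
--     rs = runs(s)
--     m = min(k for _, k in rs)
--     removed = [c for c, k in rs if k == m]
--     return ''.join(c for c in l if c not in removed)
-- ===== Notes on version B (the rewrite author's own statement) =====
-- stated objective: faster
-- what changed: B sorts the characters, decomposes the sorted list into maximal runs of equal characters by a recursive scan (run length = frequency), takes the minimum run length, and filters the original string by membership in the list of shortest-run characters, instead of A's quadratic per-position count array compared index-by-index to its minimum.
import Mathlib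
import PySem

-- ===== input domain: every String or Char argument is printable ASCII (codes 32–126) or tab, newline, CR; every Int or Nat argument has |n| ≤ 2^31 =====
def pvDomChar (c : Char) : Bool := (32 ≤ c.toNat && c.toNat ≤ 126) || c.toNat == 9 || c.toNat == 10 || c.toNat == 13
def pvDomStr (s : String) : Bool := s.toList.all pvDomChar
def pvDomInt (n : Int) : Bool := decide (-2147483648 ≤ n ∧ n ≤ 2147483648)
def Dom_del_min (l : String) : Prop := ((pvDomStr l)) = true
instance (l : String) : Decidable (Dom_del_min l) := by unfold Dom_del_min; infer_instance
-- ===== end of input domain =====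

-- B replaces A's quadratic per-position count array with sort + recursive run-length
-- decomposition of the sorted characters (objective: faster).

-- ===== PORT A =====
-- literal port of A; 'l.count(i)' where i is the single character l[k]: str.count of a
-- one-character needle is exactly the character count, ported as List.count (exact here).
def del_min (l : String) : String :=
  let cs := l.toList
  let tmp : List Int := cs.foldl (fun acc c => acc ++ [(cs.count c : Int)]) []
  match PySem.List.min? tmp (fun v => v) with
  | none => ""   -- min([]) raises ValueError in Python: excluded by Pre_del_min
  | some m =>
    let res : List Char :=
      (PySem.List.pyRange 0 (PySem.List.len cs) 1).foldl
        (fun acc i =>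
          if PySem.List.pyGetD tmp i 0 ≠ m then acc ++ [PySem.List.pyGetD cs i ' ']
          else acc) []
    String.ofList res

-- ===== PORT B =====
-- literal port of B's inner 'runs': the while loop 'k = 1; while k < len(s) and s[k] == c'
-- scans the matching prefix of the tail, i.e. k = 1 + length of takeWhile (== c) on the
-- tail (exact), and s[k:] is the remaining drop.
def runsB : List Char → List (Char × Int)
  | [] => []
  | c :: t =>
    (c, 1 + ((t.takeWhile (fun d => d == c)).length : Int)) ::
      runsB (t.drop (t.takeWhile (fun d => d == c)).length)
termination_by s => s.length
decreasing_by
  simp only [List.length_cons, List.length_drop]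
  omega

def del_min_alt (l : String) : String :=
  let cs := l.toList
  let s := PySem.List.sorted cs (fun c => c) false
  let rs := runsB s
  match PySem.List.min? (rs.map Prod.snd) (fun v => v) with
  | none => ""   -- min of an empty generator raises ValueError in Python: excluded by Pre_del_min
  | some m =>
    let removed : List Char := (rs.filter (fun p => p.2 == m)).map Prod.fst
    String.ofList (cs.filter (fun c => !(removed.contains c)))

-- ===== PRECONDITION & SPEC =====
-- Pre_ excludes only the empty string, on which Python A (and B) raises ValueError from min().
def Pre_del_min (l : String) : Prop := l.toList ≠ []
instance (l : String) : Decidable (Pre_del_min l) := by unfold Pre_del_min; infer_instance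
def pvWitness_del_min : String := "aab"

def Spec_del_min (l : String) (out : String) : Prop := out = del_min_alt l
instance (l : String) (out : String) : Decidable (Spec_del_min l out) := by unfold Spec_del_min; infer_instance

-- ===== CLAIM (what is proved, stated in full; the proofs are below) =====
def Claim_equal_del_min : Prop := ∀ (l : String), Dom_del_min l → Pre_del_min l → Spec_del_min l (del_min l)

-- ===== LEMMAS AND PROOFS =====

-- mins over value-equivalent Int lists agree
lemma min?_id_eq_of_mem_iff (xs ys : List Int) (h : ∀ v, v ∈ xs ↔ v ∈ ys) :
    PySem.List.min? xs (fun v => v) = PySem.List.min? ys (fun v => v) := by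
  have hnil : xs = [] → ys = [] := by
    intro hh
    apply List.eq_nil_iff_forall_not_mem.mpr
    intro v hv
    exact absurd ((h v).mpr hv) (by simp [hh])
  have hnil' : ys = [] → xs = [] := by
    intro hh
    apply List.eq_nil_iff_forall_not_mem.mpr
    intro v hv
    exact absurd ((h v).mp hv) (by simp [hh])
  rcases hx : PySem.List.min? xs (fun v => v) with _ | a
  · exact ((PySem.List.min?_eq_none_iff _ _).mpr (hnil ((PySem.List.min?_eq_none_iff _ _).mp hx))).symm
  · rcases hy : PySem.List.min? ys (fun v => v) with _ | b
    · rw [hnil' ((PySem.List.min?_eq_none_iff _ _).mp hy)] at hx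
      cases ((PySem.List.min?_eq_none_iff ([] : List Int) _).mpr rfl).symm.trans hx
    · exact congrArg some (le_antisymm
        (PySem.List.min?_isMin hx b ((h b).mpr (PySem.List.min?_mem hy)))
        (PySem.List.min?_isMin hy a ((h a).mp (PySem.List.min?_mem hx))))

-- A's index loop over a prefix is a filter of the prefix
lemma loopA_take (cs : List Char) (f : Char → Int) (m : Int) (k : Nat) (hk : k ≤ cs.length) :
    (PySem.List.pyRange 0 (k : Int) 1).foldl
      (fun acc i =>
        if PySem.List.pyGetD (cs.map f) i 0 ≠ m then acc ++ [PySem.List.pyGetD cs i ' ']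
        else acc) []
    = (cs.take k).filter (fun c => decide (f c ≠ m)) := by
  induction k with
  | zero => simp [PySem.List.pyRange_one_eq_nil]
  | succ k ih =>
    have hkl : k < cs.length := hk
    rw [show ((k + 1 : Nat) : Int) = (k : Int) + 1 by push_cast; ring]
    rw [PySem.List.pyRange_one_succ_right (by positivity), List.foldl_append, ih (le_of_lt hkl)]
    rw [List.take_add_one]
    simp only [List.foldl_cons, List.foldl_nil, PySem.List.pyGetD_natCast,
      List.getElem?_eq_getElem hkl, Option.toList_some, List.filter_append, List.filter_cons,
      List.filter_nil, List.getD, Option.getD_some, List.getElem?_map, Option.map_some]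
    by_cases hfm : f cs[k] = m <;> simp [hfm]

-- dropping the takeWhile-length prefix is dropWhile
lemma drop_takeWhile_length (t : List Char) (p : Char → Bool) :
    t.drop (t.takeWhile p).length = t.dropWhile p := by
  induction t with
  | nil => rfl
  | cons a u ih =>
    by_cases h : p a = true
    · simp [h, ih]
    · simp [h]

-- in a sorted list, everything after the initial block of c's is strictly greater than c
lemma dropWhile_gt_of_sorted (c : Char) (t : List Char)
    (hs : List.Pairwise (· ≤ ·) (c :: t)) :
    ∀ x ∈ t.dropWhile (fun d => d == c), c < x := by
  have hts : List.Pairwise (fun a b : Char => a ≤ b) (t.dropWhile (fun d => d == c)) :=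
    (hs.of_cons).sublist (List.dropWhile_sublist _)
  have hle : ∀ x ∈ t.dropWhile (fun d => d == c), c ≤ x := by
    intro x hx
    exact (List.pairwise_cons.mp hs).1 x ((List.dropWhile_sublist _).mem hx)
  cases hd : t.dropWhile (fun d => d == c) with
  | nil => simp
  | cons a u =>
    have ha : ¬ (a == c) = true := by
      have h0 := List.head?_dropWhile_not (fun d => d == c) t
      rw [hd] at h0
      simpa using h0
    have hac : c < a := lt_of_le_of_ne (by rw [hd] at hle; exact hle a (by simp)) (by
      intro h; exact ha (by simp [h.symm]))
    intro x hx
    rcases List.mem_cons.mp hx with rfl | hxu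
    · exact hac
    · rw [hd] at hts
      exact lt_of_lt_of_le hac ((List.pairwise_cons.mp hts).1 x hxu)

-- every pair produced by runsB on a sorted list is (a member, its count)
lemma runsB_sound (s : List Char) (hs : List.Pairwise (fun a b : Char => a ≤ b) s) :
    ∀ c L, (c, L) ∈ runsB s → c ∈ s ∧ L = (s.count c : Int) := by
  induction s using runsB.induct with
  | case1 => intro c L h; simp [runsB] at h
  | case2 a t ih =>
    intro c L h
    rw [runsB] at h
    have hgt := dropWhile_gt_of_sorted a t hs
    have hdrop : t.drop (t.takeWhile (fun d => d == a)).length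
        = t.dropWhile (fun d => d == a) := drop_takeWhile_length t _
    rcases List.mem_cons.mp h with heq | htail
    · injection heq with hc hL
      subst hc
      refine ⟨by simp, ?_⟩
      have hcount : t.count c = (t.takeWhile (fun d => d == c)).length := by
        conv_lhs => rw [← List.takeWhile_append_dropWhile (p := fun d => d == c) (l := t)]
        rw [List.count_append]
        have h1 : (t.takeWhile (fun d => d == c)).count c
            = (t.takeWhile (fun d => d == c)).length := by
          apply List.count_eq_length.mpr
          intro b hb
          have hbc := List.mem_takeWhile_imp hb
          exact (eq_of_beq hbc).symm
        have h2 : (t.dropWhile (fun d => d == c)).count c = 0 := by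
          apply List.count_eq_zero.mpr
          intro hmem
          exact absurd rfl (ne_of_gt (hgt c hmem))
        omega
      rw [hL, List.count_cons_self, hcount]
      push_cast; ring
    · have hsd : List.Pairwise (fun a b : Char => a ≤ b)
          (t.drop (t.takeWhile (fun d => d == a)).length) := by
        rw [hdrop]; exact (hs.of_cons).sublist (List.dropWhile_sublist _)
      have ih' := ih hsd c L htail
      rw [hdrop] at ih'
      have hmem : c ∈ t.dropWhile (fun d => d == a) := ih'.1
      have hca : a < c := hgt c hmem
      have hcm : c ∈ t := (List.dropWhile_sublist _).mem hmem
      refine ⟨List.mem_cons_of_mem _ hcm, ?_⟩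
      rw [ih'.2]
      have hcc : (a :: t).count c = (t.dropWhile (fun d => d == a)).count c := by
        rw [List.count_cons]
        conv_lhs => rw [← List.takeWhile_append_dropWhile (p := fun d => d == a) (l := t)]
        rw [List.count_append]
        have h1 : (t.takeWhile (fun d => d == a)).count c = 0 := by
          apply List.count_eq_zero.mpr
          intro hmemtw
          have hmc := List.mem_takeWhile_imp hmemtw
          exact absurd (eq_of_beq hmc) (ne_of_gt hca)
        have h2 : ¬ (c = a) := ne_of_gt hca
        have h3 : ¬ (a = c) := fun hh => h2 hh.symm
        simp [h1, h3]
      rw [hcc]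

-- every member of s appears as the character of some run
lemma runsB_cover (s : List Char) : ∀ c ∈ s, ∃ L, (c, L) ∈ runsB s := by
  induction s using runsB.induct with
  | case1 => intro c h; simp at h
  | case2 a t ih =>
    intro c hc
    rw [runsB]
    by_cases hca : c = a
    · subst hca
      exact ⟨1 + ((t.takeWhile (fun d => d == c)).length : Int), List.mem_cons_self⟩
    · have hct : c ∈ t := by
        rcases List.mem_cons.mp hc with h | h
        · exact absurd h hca
        · exact h
      have hcd : c ∈ t.drop (t.takeWhile (fun d => d == a)).length := by
        rw [drop_takeWhile_length]
        conv at hct => rw [← List.takeWhile_append_dropWhile (p := fun d => d == a) (l := t)]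
        rcases List.mem_append.mp hct with h | h
        · have hmc := List.mem_takeWhile_imp h
          exact absurd (eq_of_beq hmc) hca
        · exact h
      rcases ih c hcd with ⟨L, hL⟩
      exact ⟨L, List.mem_cons_of_mem _ hL⟩

theorem del_min_eq_alt (l : String) (h : l.toList ≠ []) : del_min l = del_min_alt l := by
  unfold del_min del_min_alt
  simp only []
  set cs := l.toList with hcs
  set s := PySem.List.sorted cs (fun c => c) false with hsdef
  have hperm : s.Perm cs := PySem.List.sorted_perm cs (fun c => c) false
  have hsorted : List.Pairwise (fun a b : Char => a ≤ b) s := 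
    PySem.List.sorted_pairwise cs (fun c => c)
  have hsound := runsB_sound s hsorted
  have hcover := runsB_cover s
  have hcount : ∀ c : Char, s.count c = cs.count c := fun c => hperm.count_eq c
  have htmp : cs.foldl (fun acc c => acc ++ [(cs.count c : Int)]) ([] : List Int)
      = cs.map (fun c => (cs.count c : Int)) := by
    simpa using PySem.List.foldl_append_singleton_eq_map
      (l := cs) (f := fun c => (cs.count c : Int)) (acc := [])
  have hmin : PySem.List.min? (cs.map (fun c => (cs.count c : Int))) (fun v => v)
      = PySem.List.min? ((runsB s).map Prod.snd) (fun v => v) := by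
    apply min?_id_eq_of_mem_iff
    intro v
    simp only [List.mem_map]
    constructor
    · rintro ⟨c, hc, rfl⟩
      rcases hcover c (hperm.mem_iff.mpr hc) with ⟨L, hL⟩
      refine ⟨(c, L), hL, ?_⟩
      have := (hsound c L hL).2
      simpa [hcount c] using this
    · rintro ⟨⟨c, L⟩, hL, rfl⟩
      rcases hsound c L hL with ⟨hmem, hLc⟩
      exact ⟨c, hperm.mem_iff.mp hmem, by simp [hLc, hcount c]⟩
  rw [htmp, hmin]
  cases hm : PySem.List.min? ((runsB s).map Prod.snd) (fun v => v) with
  | none =>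
    exfalso
    apply h
    have h2 : runsB s = [] := List.map_eq_nil_iff.mp ((PySem.List.min?_eq_none_iff _ _).mp hm)
    have hs0 : s = [] := by
      cases hse : s with
      | nil => rfl
      | cons a t => rw [hse, runsB] at h2; cases h2
    exact ((hs0 ▸ hperm.symm) : cs.Perm []).eq_nil
  | some m =>
    have hloop := loopA_take cs (fun c => (cs.count c : Int)) m cs.length (le_refl _)
    simp only [PySem.List.len_eq]
    rw [hloop, List.take_length]
    congr 1
    apply List.filter_congr
    intro c hc
    have hmemiff : (((runsB s).filter (fun p => p.2 == m)).map Prod.fst).contains c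
        = decide ((cs.count c : Int) = m) := by
      by_cases hcm : (cs.count c : Int) = m
      · simp only [hcm, decide_true]
        rcases hcover c (hperm.mem_iff.mpr hc) with ⟨L, hL⟩
        have hLval : L = m := by
          have := (hsound c L hL).2
          rw [this, hcount c, hcm]
        apply List.contains_iff_mem.mpr
        exact List.mem_map.mpr ⟨(c, L), List.mem_filter.mpr ⟨hL, by simp [hLval]⟩, rfl⟩
      · simp only [hcm, decide_false]
        apply Bool.eq_false_iff.mpr
        intro hcon
        rcases List.mem_map.mp (List.contains_iff_mem.mp hcon) with ⟨⟨c', L⟩, hmf, hfst⟩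
        rcases List.mem_filter.mp hmf with ⟨hrun, hLm⟩
        have hc' : c' = c := hfst
        have := (hsound c L (hc' ▸ hrun)).2
        apply hcm
        rw [← hcount c, ← this]
        simpa using hLm
    rw [hmemiff]
    by_cases hcm : (cs.count c : Int) = m <;> simp [hcm]

-- ===== VERDICT (by name: the statement is the Claim_ definition above) =====
theorem del_min_spec : Claim_equal_del_min := by
  intro l _ h
  unfold Spec_del_min
  exact del_min_eq_alt l h
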